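-- pv_equiv track=rewrite | github.com/AlpacaMale/programmers-coding-test | 신규_아이디_추천.py | solution
-- ===== SOURCE A (Python) =====
-- def solution(new_id):
--     new_id_phase1 = new_id.lower()
--     new_id_phase2 = "".join(
--         char
--         for char in new_id_phase1
--         if char.isalpha() or char.isdigit() or char in ["-", "_", "."]
--     )
--     new_id_phase3 = ""
--     flag = False
--     for char in new_id_phase2:
--         if char == "." and not flag:
--             flag = True
--             new_id_phase3 += char
--         elif char != "." and flag:
--             flag = False
--             new_id_phase3 += char
--         elif not flag:
--             new_id_phase3 += char
--     new_id_phase4 = new_id_phase3.strip(".")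
--     new_id_phase5 = new_id_phase4 or "a"
--     new_id_phase6 = new_id_phase5[:15].rstrip(".")
--     new_id_phase7 = new_id_phase6
--     if len(new_id_phase6) <= 2:
--         for _ in range(3 - len(new_id_phase6)):
--             new_id_phase7 += new_id_phase6[-1]
--     return new_id_phase7
-- ===== SOURCE B (Python) =====
-- def solution(new_id):
--     s = new_id.lower()
--     s = "".join(c for c in s if c.isalpha() or c.isdigit() or c in "-_.")
--     # collapse dot runs by a pairwise scan: keep a char unless it is a dot followed by a dot
--     s = "".join(c for c, nxt in zip(s, s[1:]) if c != "." or nxt != ".") + s[-1:]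
--     s = s.strip(".") or "a"
--     s = s[:15].rstrip(".")
--     return s if len(s) >= 3 else s + s[-1] * (3 - len(s))
-- ===== Notes on version B (the rewrite author's own statement) =====
-- stated objective: simpler
-- what changed: The flag-based state machine that collapses dot runs is replaced by a stateless pairwise zip(s, s[1:]) scan (keep a char unless it is a dot followed by a dot), and the char-by-char padding loop by string multiplication.
import Mathlib
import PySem

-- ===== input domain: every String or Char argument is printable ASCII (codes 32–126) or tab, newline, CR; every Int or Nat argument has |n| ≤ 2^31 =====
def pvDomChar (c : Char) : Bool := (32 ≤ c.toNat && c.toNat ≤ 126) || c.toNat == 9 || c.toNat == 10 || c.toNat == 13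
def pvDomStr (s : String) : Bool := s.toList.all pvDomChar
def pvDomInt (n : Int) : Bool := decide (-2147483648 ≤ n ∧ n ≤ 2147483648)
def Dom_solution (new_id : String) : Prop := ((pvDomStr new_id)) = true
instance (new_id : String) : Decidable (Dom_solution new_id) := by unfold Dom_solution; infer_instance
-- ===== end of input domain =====

-- B replaces A's flag state machine (dot collapsing) by a stateless pairwise zip scan and the
-- padding loop by replication; objective: simpler.

-- shared helper: exact port of str.rstrip(".") (strip set is the single char '.')
def pyRstripDot (cs : List Char) : List Char :=
  (cs.reverse.dropWhile (fun c => ['.'].contains c)).reverse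

-- ===== PORT A =====
def solution (new_id : String) : String :=
  let p1 := PySem.Chars.lower new_id.toList
  let p2 := p1.filter (fun c =>
      PySem.Chars.isalpha c || PySem.Chars.isdigit c || (c == '-' || c == '_' || c == '.'))
  let p3 := (p2.foldl (fun (st : List Char × Bool) c =>
      if c == '.' && !st.2 then (st.1 ++ [c], true)
      else if c != '.' && st.2 then (st.1 ++ [c], false)
      else if !st.2 then (st.1 ++ [c], st.2)
      else st) ([], false)).1
  let p4 := PySem.Chars.stripChars p3 ['.']
  let p5 := if p4 = [] then ['a'] else p4
  let p6 := pyRstripDot (PySem.List.slice p5 none (some 15))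
  let p7 := if p6.length ≤ 2 then
      (PySem.List.pyRange 0 (3 - (p6.length : Int)) 1).foldl
        (fun acc _ => acc ++ (match PySem.List.pyGet? p6 (-1) with
           | some c => [c] | none => [])) p6
    else p6
  String.ofList p7

-- ===== PORT B =====
def solution_alt (new_id : String) : String :=
  let s1 := (PySem.Chars.lower new_id.toList).filter (fun c =>
      PySem.Chars.isalpha c || PySem.Chars.isdigit c || (c == '-' || c == '_' || c == '.'))
  let s2 := ((s1.zip (PySem.List.slice s1 (some 1) none)).filter
        (fun p => !(p.1 == '.' && p.2 == '.'))).map Prod.fst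
      ++ PySem.List.slice s1 (some (-1)) none
  let s3 := PySem.Chars.stripChars s2 ['.']
  let s4 := if s3 = [] then ['a'] else s3
  let s5 := pyRstripDot (PySem.List.slice s4 none (some 15))
  String.ofList (if 3 ≤ s5.length then s5
    else s5 ++ (match PySem.List.pyGet? s5 (-1) with
       | some c => List.replicate (3 - s5.length) c | none => []))

-- ===== PRECONDITION & SPEC =====
def Spec_solution (new_id : String) (out : String) : Prop := out = solution_alt new_id
instance (new_id : String) (out : String) : Decidable (Spec_solution new_id out) := by unfold Spec_solution; infer_instance

-- ===== CLAIM (what is proved, stated in full; the proofs are below) =====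
def Claim_equal_solution : Prop := ∀ (new_id : String), Dom_solution new_id → Spec_solution new_id (solution new_id)

-- ===== LEMMAS AND PROOFS =====

-- A's dot-collapsing loop as a structural recursion (suffix still to be produced, given the flag)
def goA : List Char → Bool → List Char
  | [], _ => []
  | c :: cs, flag =>
    if c == '.' && !flag then c :: goA cs true
    else if c != '.' && flag then c :: goA cs false
    else if !flag then c :: goA cs flag
    else goA cs flag

-- the loop body of A's dot-collapsing for-loop, named for the proofs
def stepA (st : List Char × Bool) (c : Char) : List Char × Bool :=
  if c == '.' && !st.2 then (st.1 ++ [c], true)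
  else if c != '.' && st.2 then (st.1 ++ [c], false)
  else if !st.2 then (st.1 ++ [c], st.2)
  else st

lemma stepA_false (acc : List Char) (c : Char) :
    stepA (acc, false) c = (acc ++ [c], c == '.') := by
  by_cases hc : c = '.' <;> simp [stepA, hc]

lemma stepA_true (acc : List Char) (c : Char) :
    stepA (acc, true) c = if c == '.' then (acc, true) else (acc ++ [c], false) := by
  by_cases hc : c = '.' <;> simp [stepA, hc]

lemma foldA (xs : List Char) (acc : List Char) (flag : Bool) :
    (xs.foldl stepA (acc, flag)).1 = acc ++ goA xs flag := by
  induction xs generalizing acc flag with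
  | nil => simp [goA]
  | cons c cs ih =>
    rw [List.foldl_cons]
    cases flag with
    | false =>
      rw [stepA_false, ih]
      by_cases hc : c = '.'
      · simp [goA, hc, List.append_assoc]
      · rw [show (c == '.') = false from by simp [hc]]
        simp [goA, hc, List.append_assoc]
    | true =>
      by_cases hc : c = '.'
      · rw [stepA_true, if_pos (by simp [hc]), ih]
        simp [goA, hc]
      · rw [stepA_true, if_neg (by simp [hc]), ih]
        simp [goA, hc, List.append_assoc]

-- B's collapsing expressed on lists
def hB (xs : List Char) : List Char :=
  ((xs.zip xs.tail).filter (fun p => !(p.1 == '.' && p.2 == '.'))).map Prod.fst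
    ++ xs.drop (xs.length - 1)

lemma goA_eq_hB (xs : List Char) : goA xs false = hB xs := by
  induction xs with
  | nil => simp [goA, hB]
  | cons c cs ih =>
    cases cs with
    | nil =>
      by_cases hc : c = '.' <;> simp [goA, hB, hc]
    | cons n t =>
      by_cases hcn : c = '.' ∧ n = '.'
      · obtain ⟨hc, hn⟩ := hcn
        subst hc; subst hn
        have l1 : goA ('.' :: '.' :: t) false = goA ('.' :: t) false := by
          simp [goA]
        have l2 : hB ('.' :: '.' :: t) = hB ('.' :: t) := by
          simp [hB, List.length]
        rw [l1, l2]
        -- cannot use ih (it is about n :: t = '.' :: t) — it is exactly ih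
        exact ih
      · -- head kept on both sides
        have hA : goA (c :: n :: t) false = c :: goA (n :: t) false := by
          by_cases hc : c = '.'
          · subst hc
            have hn : ¬ n = '.' := by tauto
            simp [goA, hn]
          · simp [goA, hc]
        have hkeep : (!(c == '.') || !(n == '.')) = true := by
          by_cases hc : c = '.'
          · have hn : n ≠ '.' := fun h => hcn ⟨hc, h⟩
            simp [hc, hn]
          · simp [hc]
        have hBs : hB (c :: n :: t) = c :: hB (n :: t) := by
          simp [hB, hkeep, List.length]
        rw [hA, hBs, ih]

lemma pad_eq (p : List Char) :
    (if p.length ≤ 2 then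
      (PySem.List.pyRange 0 (3 - (p.length : Int)) 1).foldl
        (fun acc _ => acc ++ (match PySem.List.pyGet? p (-1) with
           | some c => [c] | none => [])) p
    else p)
    = (if 3 ≤ p.length then p
       else p ++ (match PySem.List.pyGet? p (-1) with
          | some c => List.replicate (3 - p.length) c | none => [])) := by
  match p with
  | [] => decide
  | [a] =>
    rw [if_pos (by simp), if_neg (by simp)]
    rw [show [a].length = 1 from rfl]
    rw [show PySem.List.pyRange 0 (3 - ((1 : Nat) : Int)) 1 = [0, 1] from by decide]
    simp [PySem.List.pyGet?_neg_one, List.foldl]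
  | [a, b] =>
    rw [if_pos (by simp), if_neg (by simp)]
    rw [show [a, b].length = 2 from rfl]
    rw [show PySem.List.pyRange 0 (3 - ((2 : Nat) : Int)) 1 = [0] from by decide]
    simp [PySem.List.pyGet?_neg_one, List.foldl]
  | a :: b :: d :: t =>
    simp

-- ===== VERDICT (by name: the statement is the Claim_ definition above) =====
theorem solution_spec : Claim_equal_solution := by
  intro new_id _
  unfold Spec_solution solution solution_alt
  simp only [PySem.List.slice_from_one, PySem.List.slice_from_neg_one]
  rw [show (fun (st : List Char × Bool) c =>
      if c == '.' && !st.2 then (st.1 ++ [c], true)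
      else if c != '.' && st.2 then (st.1 ++ [c], false)
      else if !st.2 then (st.1 ++ [c], st.2)
      else st) = stepA from rfl]
  rw [foldA]
  rw [show ∀ xs : List Char, ([] : List Char) ++ goA xs false = hB xs from
    fun xs => by simpa using goA_eq_hB xs]
  simp only [hB]
  rw [← pad_eq]
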